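-- pv_equiv track=rewrite | github.com/edwcrtn/new-doss-othello | aveclesbords.py | recursifw
-- ===== SOURCE A (Python) =====
-- bordg=[0,8,16,24,32,40,48,56]  #bord droit
--
-- bordd=[7,15,23,31,39,47,55,63]  #bord gauche
--
-- def recursifw(lb,lw,cp,i,j,a,b):
--     if i+j*(a-2) in bordd and j in [-7,+1,+9]:
--         return None
--     if i+j*(a-2) in bordg and j in [-9,-1,+7]:
--         return None
--     if i+j*b in lb and i+j*a not in cp and i+j*a not in lw and i+j*a not in lb:
--         if i+j*b in bordd and j in [-7,+1,+9]:
--             return None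
--         if i+j*b in bordg and j in [-9,-1,+7]:
--             return None
--         return i+j*a
--     if i+j*b in lb and i+j*a not in cp and i+j*a not in lw and i+j*a in lb:
--         a=a+1
--         b+=1
--         return(recursifw(lb,lw,cp,i,j,a,b))
-- ===== SOURCE B (Python) =====
-- bordg = [0, 8, 16, 24, 32, 40, 48, 56]  # bord droit
-- bordd = [7, 15, 23, 31, 39, 47, 55, 63]  # bord gauche
--
--
-- def _edge_block(pos, j):
--     # the position 'pos' sits on an edge that the direction j runs off
--     return (pos in bordd and j in (-7, 1, 9)) or (pos in bordg and j in (-9, -1, 7))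
--
--
-- def recursifw(lb, lw, cp, i, j, a, b):
--     while True:
--         if _edge_block(i + j * (a - 2), j):
--             return None
--         cur = i + j * a
--         if i + j * b not in lb or cur in cp or cur in lw:
--             return None
--         if cur in lb:
--             a += 1
--             b += 1
--             continue
--         return None if _edge_block(i + j * b, j) else cur
-- ===== Notes on version B (the rewrite author's own statement) =====
-- stated objective: simpler
-- what changed: Replaced the tail recursion with an iterative while-True loop over running a/b, and factored the four duplicated edge-guard tests into one helper with a single early rejection of the non-flippable case.
import Mathlib
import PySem

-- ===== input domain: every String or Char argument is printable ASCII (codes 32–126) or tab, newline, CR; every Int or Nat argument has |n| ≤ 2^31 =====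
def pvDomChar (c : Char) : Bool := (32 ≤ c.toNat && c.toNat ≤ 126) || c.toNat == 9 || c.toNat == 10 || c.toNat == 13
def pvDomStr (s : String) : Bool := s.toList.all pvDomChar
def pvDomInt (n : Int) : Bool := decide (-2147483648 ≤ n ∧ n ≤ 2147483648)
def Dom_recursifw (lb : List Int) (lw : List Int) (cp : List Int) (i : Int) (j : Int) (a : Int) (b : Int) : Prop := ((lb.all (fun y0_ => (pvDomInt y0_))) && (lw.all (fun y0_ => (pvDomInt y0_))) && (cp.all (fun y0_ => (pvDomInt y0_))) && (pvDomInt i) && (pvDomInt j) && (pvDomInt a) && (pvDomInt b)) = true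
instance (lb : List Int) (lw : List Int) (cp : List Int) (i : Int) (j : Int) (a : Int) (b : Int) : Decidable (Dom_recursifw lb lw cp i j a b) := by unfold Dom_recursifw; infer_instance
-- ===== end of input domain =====

-- B rewrites A's tail recursion as an iterative loop over running a/b with the
-- duplicated edge-guard tests factored into one helper (objective: simpler).
-- Both fueled helpers use fuel lb.length + 1: inside Pre_ the walk can recurse
-- at most lb.length times (each recursive step needs a fresh i+j*a ∈ lb), so the
-- fuel is never exhausted there; the fuel only makes the definitions total.

-- ===== PORT A =====
def bordg : List Int := [0, 8, 16, 24, 32, 40, 48, 56]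
def bordd : List Int := [7, 15, 23, 31, 39, 47, 55, 63]

def recursifwFuel (lb lw cp : List Int) (i j : Int) : Nat → Int → Int → Option Int
  | 0, _, _ => none
  | fuel+1, a, b =>
    if (i + j * (a - 2)) ∈ bordd ∧ (j = -7 ∨ j = 1 ∨ j = 9) then none
    else if (i + j * (a - 2)) ∈ bordg ∧ (j = -9 ∨ j = -1 ∨ j = 7) then none
    else if (i + j * b) ∈ lb ∧ (i + j * a) ∉ cp ∧ (i + j * a) ∉ lw ∧ (i + j * a) ∉ lb then
      if (i + j * b) ∈ bordd ∧ (j = -7 ∨ j = 1 ∨ j = 9) then none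
      else if (i + j * b) ∈ bordg ∧ (j = -9 ∨ j = -1 ∨ j = 7) then none
      else some (i + j * a)
    else if (i + j * b) ∈ lb ∧ (i + j * a) ∉ cp ∧ (i + j * a) ∉ lw ∧ (i + j * a) ∈ lb then
      recursifwFuel lb lw cp i j fuel (a + 1) (b + 1)
    else none

def recursifw (lb : List Int) (lw : List Int) (cp : List Int) (i : Int) (j : Int) (a : Int) (b : Int) : Option Int :=
  recursifwFuel lb lw cp i j (lb.length + 1) a b

-- ===== PORT B =====
def edgeBlock (pos j : Int) : Bool :=
  (decide (pos ∈ bordd) && (j == -7 || j == 1 || j == 9)) ||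
  (decide (pos ∈ bordg) && (j == -9 || j == -1 || j == 7))

def recursifwAltGo (lb lw cp : List Int) (i j : Int) : Nat → Int → Int → Option Int
  | 0, _, _ => none
  | fuel+1, a, b =>
    if edgeBlock (i + j * (a - 2)) j then none
    else
      let cur := i + j * a
      if (i + j * b) ∉ lb ∨ cur ∈ cp ∨ cur ∈ lw then none
      else if cur ∈ lb then recursifwAltGo lb lw cp i j fuel (a + 1) (b + 1)
      else if edgeBlock (i + j * b) j then none
      else some cur

def recursifw_alt (lb : List Int) (lw : List Int) (cp : List Int) (i : Int) (j : Int) (a : Int) (b : Int) : Option Int :=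
  recursifwAltGo lb lw cp i j (lb.length + 1) a b

-- ===== PRECONDITION & SPEC =====
-- Pre_ excludes exactly the inputs on which the Python A raises RecursionError
-- (j = 0 with i ∈ lb, i ∉ cp, i ∉ lw: the walk never advances).
def Pre_recursifw (lb : List Int) (lw : List Int) (cp : List Int) (i : Int) (j : Int) (a : Int) (b : Int) : Prop :=
  ¬ (j = 0 ∧ i ∈ lb ∧ i ∉ cp ∧ i ∉ lw)
instance (lb : List Int) (lw : List Int) (cp : List Int) (i : Int) (j : Int) (a : Int) (b : Int) : Decidable (Pre_recursifw lb lw cp i j a b) := by unfold Pre_recursifw; infer_instance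

def pvWitness_recursifw : List Int × List Int × List Int × Int × Int × Int × Int :=
  ([10], [], [], 9, 1, 2, 1)

def Spec_recursifw (lb : List Int) (lw : List Int) (cp : List Int) (i : Int) (j : Int) (a : Int) (b : Int) (out : Option Int) : Prop := out = recursifw_alt lb lw cp i j a b
instance (lb : List Int) (lw : List Int) (cp : List Int) (i : Int) (j : Int) (a : Int) (b : Int) (out : Option Int) : Decidable (Spec_recursifw lb lw cp i j a b out) := by unfold Spec_recursifw; infer_instance

-- ===== CLAIM (what is proved, stated in full; the proofs are below) =====
def Claim_equal_recursifw : Prop := ∀ (lb : List Int) (lw : List Int) (cp : List Int) (i : Int) (j : Int) (a : Int) (b : Int), Dom_recursifw lb lw cp i j a b → Pre_recursifw lb lw cp i j a b → Spec_recursifw lb lw cp i j a b (recursifw lb lw cp i j a b)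

-- ===== LEMMAS AND PROOFS =====
theorem edgeBlock_iff (pos j : Int) :
    edgeBlock pos j = true ↔
      (pos ∈ bordd ∧ (j = -7 ∨ j = 1 ∨ j = 9)) ∨ (pos ∈ bordg ∧ (j = -9 ∨ j = -1 ∨ j = 7)) := by
  simp [edgeBlock, and_or_left, or_assoc]

theorem fuel_eq (lb lw cp : List Int) (i j : Int) (fuel : Nat) :
    ∀ a b : Int, recursifwFuel lb lw cp i j fuel a b = recursifwAltGo lb lw cp i j fuel a b := by
  induction fuel with
  | zero => intro a b; rfl
  | succ n ih =>
    intro a b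
    simp only [recursifwFuel, recursifwAltGo]
    by_cases p1 : (i + j * (a - 2)) ∈ bordd ∧ (j = -7 ∨ j = 1 ∨ j = 9)
    · rw [if_pos p1, if_pos ((edgeBlock_iff _ _).2 (Or.inl p1))]
    · rw [if_neg p1]
      by_cases p2 : (i + j * (a - 2)) ∈ bordg ∧ (j = -9 ∨ j = -1 ∨ j = 7)
      · rw [if_pos p2, if_pos ((edgeBlock_iff _ _).2 (Or.inr p2))]
      · have hgf : ¬ edgeBlock (i + j * (a - 2)) j = true := by
          rw [edgeBlock_iff]; tauto
        rw [if_neg p2, if_neg hgf]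
        by_cases hr : (i + j * b) ∉ lb ∨ (i + j * a) ∈ cp ∨ (i + j * a) ∈ lw
        · rw [if_neg (show ¬((i + j * b) ∈ lb ∧ (i + j * a) ∉ cp ∧ (i + j * a) ∉ lw ∧ (i + j * a) ∉ lb) by tauto),
              if_neg (show ¬((i + j * b) ∈ lb ∧ (i + j * a) ∉ cp ∧ (i + j * a) ∉ lw ∧ (i + j * a) ∈ lb) by tauto),
              if_pos hr]
        · push Not at hr
          rw [if_neg (show ¬((i + j * b) ∉ lb ∨ (i + j * a) ∈ cp ∨ (i + j * a) ∈ lw) by tauto)]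
          by_cases hin : (i + j * a) ∈ lb
          · rw [if_neg (show ¬((i + j * b) ∈ lb ∧ (i + j * a) ∉ cp ∧ (i + j * a) ∉ lw ∧ (i + j * a) ∉ lb) by tauto),
                if_pos (show (i + j * b) ∈ lb ∧ (i + j * a) ∉ cp ∧ (i + j * a) ∉ lw ∧ (i + j * a) ∈ lb from ⟨hr.1, hr.2.1, hr.2.2, hin⟩),
                if_pos hin]
            exact ih (a + 1) (b + 1)
          · rw [if_pos (show (i + j * b) ∈ lb ∧ (i + j * a) ∉ cp ∧ (i + j * a) ∉ lw ∧ (i + j * a) ∉ lb from ⟨hr.1, hr.2.1, hr.2.2, hin⟩),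
                if_neg hin]
            by_cases q1 : (i + j * b) ∈ bordd ∧ (j = -7 ∨ j = 1 ∨ j = 9)
            · rw [if_pos q1, if_pos ((edgeBlock_iff _ _).2 (Or.inl q1))]
            · rw [if_neg q1]
              by_cases q2 : (i + j * b) ∈ bordg ∧ (j = -9 ∨ j = -1 ∨ j = 7)
              · rw [if_pos q2, if_pos ((edgeBlock_iff _ _).2 (Or.inr q2))]
              · rw [if_neg q2, if_neg (show ¬ edgeBlock (i + j * b) j = true by
                  rw [edgeBlock_iff]; tauto)]

-- ===== VERDICT (by name: the statement is the Claim_ definition above) =====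
theorem recursifw_spec : Claim_equal_recursifw := by
  intro lb lw cp i j a b _ _
  unfold Spec_recursifw recursifw recursifw_alt
  exact fuel_eq lb lw cp i j (lb.length + 1) a b
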